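-- pv_equiv track=rewrite | github.com/open-compass/VLMEvalKit | vlmeval/dataset/utils/mmhelix/evaluators/hitori_eval.py | _check_no_duplicates
-- ===== SOURCE A (Python) =====
-- from typing import Dict, Any, Set, Tuple, List, Union
--
-- def _check_no_duplicates(shaded_cells: Set[Tuple[int, int]], grid: List[List[int]]) -> bool:
--     """
--     检查每行每列在非黑色单元格中没有重复数字
--     """
--     size = len(grid)
--
--     # 检查每行
--     for i in range(size):
--         row_values = []
--         for j in range(size):
--             if (i, j) not in shaded_cells:  # 如果不是黑色单元格
--                 row_values.append(grid[i][j])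
--
--         if len(row_values) != len(set(row_values)):
--             return False
--
--     # 检查每列
--     for j in range(size):
--         col_values = []
--         for i in range(size):
--             if (i, j) not in shaded_cells:  # 如果不是黑色单元格
--                 col_values.append(grid[i][j])
--
--         if len(col_values) != len(set(col_values)):
--             return False
--
--     return True
-- ===== SOURCE B (Python) =====
-- def _check_no_duplicates(shaded_cells, grid):
--     # Different algorithm: collect unshaded cells once, then a pairwise conflict
--     # scan -- two distinct unshaded cells sharing a row or a column must differ.
--     n = len(grid)
--     cells = [(i, j) for i in range(n) for j in range(n) if (i, j) not in shaded_cells]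
--     while cells:
--         (i1, j1) = cells[0]
--         rest = cells[1:]
--         v1 = grid[i1][j1]
--         for (i2, j2) in rest:
--             if (i1 == i2 or j1 == j2) and v1 == grid[i2][j2]:
--                 return False
--         cells = rest
--     return True
-- ===== Notes on version B (the rewrite author's own statement) =====
-- stated objective: alternative
-- what changed: Replaces A's per-row and per-column value collection with set-size duplicate tests by a single enumeration of the unshaded cells followed by a pairwise conflict scan: two distinct unshaded cells in the same row or column must carry different values.
import Mathlib
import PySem

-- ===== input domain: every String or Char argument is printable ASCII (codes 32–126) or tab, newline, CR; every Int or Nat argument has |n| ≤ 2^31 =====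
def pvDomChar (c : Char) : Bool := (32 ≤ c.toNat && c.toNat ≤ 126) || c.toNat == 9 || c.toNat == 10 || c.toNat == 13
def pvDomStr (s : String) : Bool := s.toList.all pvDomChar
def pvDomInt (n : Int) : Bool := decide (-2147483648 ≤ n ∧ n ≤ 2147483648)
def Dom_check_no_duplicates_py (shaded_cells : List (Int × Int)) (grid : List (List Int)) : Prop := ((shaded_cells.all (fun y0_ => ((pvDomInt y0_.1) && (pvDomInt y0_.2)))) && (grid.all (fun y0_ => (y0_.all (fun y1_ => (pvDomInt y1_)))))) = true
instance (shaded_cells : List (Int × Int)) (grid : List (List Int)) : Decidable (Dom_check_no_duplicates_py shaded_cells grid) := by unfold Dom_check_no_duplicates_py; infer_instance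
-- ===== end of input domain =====

-- B replaces A's per-row/per-column value collection with set-size tests by one enumeration of
-- the unshaded cells followed by a pairwise conflict scan (objective: alternative algorithm).

-- ===== PORT A =====
-- grid[i][j]; under Pre_ every access A performs is in range, so the getD defaults are never used
def pvValAt (grid : List (List Int)) (i j : Nat) : Int := (grid.getD i []).getD j 0

def check_no_duplicates_py (shaded_cells : List (Int × Int)) (grid : List (List Int)) : Bool :=
  let size := grid.length
  ((List.range size).all (fun i =>
      let row_values := (List.range size).foldl (fun acc (j : Nat) =>
          if !(shaded_cells.contains ((i : Int), (j : Int))) then acc ++ [pvValAt grid i j] else acc) []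
      row_values.length == (PySem.Set.ofList row_values).length)) &&
  ((List.range size).all (fun j =>
      let col_values := (List.range size).foldl (fun acc (i : Nat) =>
          if !(shaded_cells.contains ((i : Int), (j : Int))) then acc ++ [pvValAt grid i j] else acc) []
      col_values.length == (PySem.Set.ofList col_values).length))

-- ===== PORT B =====
-- [(i, j) for i in range(n) for j in range(n) if (i, j) not in shaded_cells]
def pvCells (shaded_cells : List (Int × Int)) (grid : List (List Int)) : List (Int × Int) :=
  (List.range grid.length).flatMap (fun (i : Nat) =>
    ((List.range grid.length).filter (fun (j : Nat) => !(shaded_cells.contains ((i : Int), (j : Int))))).map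
      (fun (j : Nat) => ((i : Int), (j : Int))))

-- grid[i][j] for a cell; cells come from range(n) so both coordinates are ≥ 0 and toNat is exact
def pvVal (grid : List (List Int)) (c : Int × Int) : Int := pvValAt grid c.1.toNat c.2.toNat

-- B's while-loop: compare the first remaining cell with every later cell, then drop it
def pvGo (grid : List (List Int)) : List (Int × Int) → Bool
  | [] => true
  | c :: rest =>
    (rest.all (fun c2 => !((c.1 == c2.1 || c.2 == c2.2) && (pvVal grid c == pvVal grid c2)))) &&
    pvGo grid rest

def check_no_duplicates_py_alt (shaded_cells : List (Int × Int)) (grid : List (List Int)) : Bool :=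
  pvGo grid (pvCells shaded_cells grid)

-- ===== PRECONDITION & SPEC =====
-- Pre_ excludes exactly the inputs where A raises IndexError: some unshaded cell (i, j) with
-- i, j < len(grid) lies beyond the end of its row (grid need not be square in Python).
def Pre_check_no_duplicates_py (shaded_cells : List (Int × Int)) (grid : List (List Int)) : Prop :=
  ∀ i < grid.length, ∀ j < grid.length,
    shaded_cells.contains ((i : Int), (j : Int)) = false → j < (grid.getD i []).length

instance (shaded_cells : List (Int × Int)) (grid : List (List Int)) : Decidable (Pre_check_no_duplicates_py shaded_cells grid) := by unfold Pre_check_no_duplicates_py; infer_instance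

def pvWitness_check_no_duplicates_py : (List (Int × Int)) × List (List Int) := ([(0, 1)], [[3, 3], [2, 3]])

def Spec_check_no_duplicates_py (shaded_cells : List (Int × Int)) (grid : List (List Int)) (out : Bool) : Prop := out = check_no_duplicates_py_alt shaded_cells grid
instance (shaded_cells : List (Int × Int)) (grid : List (List Int)) (out : Bool) : Decidable (Spec_check_no_duplicates_py shaded_cells grid out) := by unfold Spec_check_no_duplicates_py; infer_instance

-- ===== CLAIM (what is proved, stated in full; the proofs are below) =====
def Claim_equal_check_no_duplicates_py : Prop := ∀ (shaded_cells : List (Int × Int)) (grid : List (List Int)), Dom_check_no_duplicates_py shaded_cells grid → Pre_check_no_duplicates_py shaded_cells grid → Spec_check_no_duplicates_py shaded_cells grid (check_no_duplicates_py shaded_cells grid)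

-- ===== LEMMAS AND PROOFS =====

-- the conflict relation B tests pairwise
def pvR (grid : List (List Int)) (c1 c2 : Int × Int) : Prop :=
  ¬ ((c1.1 = c2.1 ∨ c1.2 = c2.2) ∧ pvVal grid c1 = pvVal grid c2)

theorem pvR_symm (grid : List (List Int)) {c1 c2 : Int × Int} (h : pvR grid c1 c2) :
    pvR grid c2 c1 := by
  rintro ⟨hor, hv⟩
  exact h ⟨hor.imp Eq.symm Eq.symm, hv.symm⟩

theorem pvOfList_sublist {α : Type} [BEq α] (l : List α) : (PySem.Set.ofList l).Sublist l := by
  induction l using List.reverseRecOn with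
  | nil => simp [PySem.Set.ofList]
  | append_singleton xs x ih =>
    rw [PySem.Set.ofList_append_singleton]
    unfold PySem.Set.add
    split
    · exact ih.trans (List.sublist_append_left xs [x])
    · exact List.Sublist.append ih (List.Sublist.refl [x])

theorem pvLenTest {α : Type} [BEq α] [LawfulBEq α] (l : List α) :
    (l.length == (PySem.Set.ofList l).length) = true ↔ l.Nodup := by
  constructor
  · intro h
    simp only [beq_iff_eq] at h
    have := (pvOfList_sublist l).eq_of_length h.symm
    exact this ▸ PySem.Set.nodup_ofList l
  · intro h
    rw [PySem.Set.ofList_eq_self_of_nodup l h]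
    simp

theorem pvGo_iff (grid : List (List Int)) (l : List (Int × Int)) :
    pvGo grid l = true ↔ l.Pairwise (pvR grid) := by
  induction l with
  | nil => simp [pvGo]
  | cons c rest ih =>
    simp only [pvGo, Bool.and_eq_true, List.all_eq_true, ih, List.pairwise_cons]
    constructor
    · rintro ⟨h1, h2⟩
      refine ⟨fun c2 hc2 => ?_, h2⟩
      have h := h1 c2 hc2
      simp at h
      simp only [pvR]
      tauto
    · rintro ⟨h1, h2⟩
      refine ⟨fun c2 hc2 => ?_, h2⟩
      have h := h1 c2 hc2
      simp only [pvR] at h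
      simp
      tauto

theorem check_no_duplicates_py_spec : Claim_equal_check_no_duplicates_py := by
  intro shaded grid _hdom _hpre
  unfold Spec_check_no_duplicates_py
  rw [Bool.eq_iff_iff]
  set n := grid.length with hn
  have hval : ∀ i j : Nat, pvVal grid ((i : Int), (j : Int)) = pvValAt grid i j := by
    intro i j; simp [pvVal]
  -- characterize A: every row group and every column group has no duplicate
  have hA : check_no_duplicates_py shaded grid = true ↔
      (∀ i ∈ List.range n, (((List.range n).filter
          (fun (j : Nat) => !(shaded.contains ((i : Int), (j : Int))))).map (fun (j : Nat) => pvValAt grid i j)).Nodup) ∧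
      (∀ j ∈ List.range n, (((List.range n).filter
          (fun (i : Nat) => !(shaded.contains ((i : Int), (j : Int))))).map (fun (i : Nat) => pvValAt grid i j)).Nodup) := by
    unfold check_no_duplicates_py
    simp only [← hn, Bool.and_eq_true, List.all_eq_true, PySem.List.foldl_append_if,
      List.nil_append, pvLenTest]
  -- characterize B: the unshaded cells are pairwise conflict-free
  have hB : check_no_duplicates_py_alt shaded grid = true ↔
      List.Pairwise (pvR grid) (pvCells shaded grid) := pvGo_iff grid _
  rw [hA, hB]
  unfold pvCells
  rw [← hn, List.pairwise_flatMap]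
  constructor
  · rintro ⟨hrows, hcols⟩
    constructor
    · -- within one row block
      intro i hi
      rw [List.pairwise_map]
      have hrow := hrows i hi
      unfold List.Nodup at hrow
      rw [List.pairwise_map] at hrow
      refine hrow.imp ?_
      intro j1 j2 hne
      simp only [pvR, hval]
      rintro ⟨-, hv⟩
      exact hne hv
    · -- across two different row blocks
      refine List.Nodup.pairwise_of_forall_ne List.nodup_range ?_
      intro i1 hi1 i2 hi2 hne x hx y hy
      simp only [List.mem_map, List.mem_filter, List.mem_range] at hx hy
      obtain ⟨j1, ⟨hj1n, hj1u⟩, rfl⟩ := hx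
      obtain ⟨j2, ⟨hj2n, hj2u⟩, rfl⟩ := hy
      simp only [pvR, hval]
      rintro ⟨hor, hv⟩
      rcases hor with h | h
      · exact hne (by exact_mod_cast h)
      · have hj : j1 = j2 := by exact_mod_cast h
        subst hj
        have hcol := hcols j1 (List.mem_range.mpr hj1n)
        unfold List.Nodup at hcol
        rw [List.pairwise_map] at hcol
        have hsym : Symmetric (fun a b : Nat => pvValAt grid a j1 ≠ pvValAt grid b j1) :=
          fun a b hab h' => hab h'.symm
        have h1 : i1 ∈ (List.range n).filter (fun (i : Nat) => !(shaded.contains ((i : Int), (j1 : Int)))) :=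
          List.mem_filter.mpr ⟨List.mem_range.mpr (List.mem_range.mp hi1), hj1u⟩
        have h2 : i2 ∈ (List.range n).filter (fun (i : Nat) => !(shaded.contains ((i : Int), (j1 : Int)))) :=
          List.mem_filter.mpr ⟨List.mem_range.mpr (List.mem_range.mp hi2), hj2u⟩
        exact hcol.forall hsym h1 h2 hne hv
  · rintro ⟨hblocks, hcross⟩
    constructor
    · -- rows from the in-block pairwise condition
      intro i hi
      have hb := hblocks i hi
      rw [List.pairwise_map] at hb
      unfold List.Nodup
      rw [List.pairwise_map]
      refine hb.imp ?_
      intro j1 j2 hR hv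
      exact hR ⟨Or.inl rfl, by rw [hval, hval]; exact hv⟩
    · -- columns from the cross-block pairwise condition
      intro j hj
      unfold List.Nodup
      rw [List.pairwise_map]
      refine List.Nodup.pairwise_of_forall_ne (List.nodup_range.filter _) ?_
      intro i1 h1 i2 h2 hne
      have h1' := List.mem_filter.mp h1
      have h2' := List.mem_filter.mp h2
      have hS : Symmetric (fun a b : Nat =>
          ∀ x ∈ ((List.range n).filter (fun (j' : Nat) => !(shaded.contains ((a : Int), (j' : Int))))).map
              (fun (j' : Nat) => ((a : Int), (j' : Int))),
          ∀ y ∈ ((List.range n).filter (fun (j' : Nat) => !(shaded.contains ((b : Int), (j' : Int))))).map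
              (fun (j' : Nat) => ((b : Int), (j' : Int))),
          pvR grid x y) :=
        fun a b hab x hx y hy => pvR_symm grid (hab y hy x hx)
      have hpair := hcross.forall hS h1'.1 h2'.1 hne
      have hx : ((i1 : Int), (j : Int)) ∈
          ((List.range n).filter (fun (j' : Nat) => !(shaded.contains ((i1 : Int), (j' : Int))))).map
            (fun (j' : Nat) => ((i1 : Int), (j' : Int))) :=
        List.mem_map.mpr ⟨j, List.mem_filter.mpr ⟨hj, h1'.2⟩, rfl⟩
      have hy : ((i2 : Int), (j : Int)) ∈
          ((List.range n).filter (fun (j' : Nat) => !(shaded.contains ((i2 : Int), (j' : Int))))).map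
            (fun (j' : Nat) => ((i2 : Int), (j' : Int))) :=
        List.mem_map.mpr ⟨j, List.mem_filter.mpr ⟨hj, h2'.2⟩, rfl⟩
      have hR := hpair _ hx _ hy
      intro hv
      exact hR ⟨Or.inr rfl, by rw [hval, hval]; exact hv⟩
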